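-- pv_equiv track=rewrite | github.com/hyunbeanohh/OIL-legacy-study | Hacker Ranks/Sprint training.py | getMostVisited
-- ===== SOURCE A (Python) =====
-- def getMostVisited(n, sprints):
--     incre_mental = [0] * (n + 2)
--
--     for i in range(len(sprints) - 1):
--         start = min(sprints[i], sprints[i + 1])
--         end = max(sprints[i], sprints[i + 1])
--         incre_mental[start] += 1
--         incre_mental[end + 1] -= 1
--
--     scores = [0] * (n + 1)
--     score = 0
--
--     for i in range(1, n + 1):
--         score += incre_mental[i]
--         scores[i] = score
--     return scores.index(max(scores))
-- ===== SOURCE B (Python) =====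
-- def getMostVisited(n, sprints):
--     scores = [0] * (n + 1)
--     for i in range(len(sprints) - 1):
--         start = min(sprints[i], sprints[i + 1])
--         end = max(sprints[i], sprints[i + 1])
--         for pos in range(start, end + 1):
--             scores[pos] += 1
--     return scores.index(max(scores))
-- ===== Notes on version B (the rewrite author's own statement) =====
-- stated objective: alternative
-- what changed: B replaces A's difference-array marking plus prefix-sum pass with direct per-position increments over each covered range (naive range increment), then takes the index of the first maximum.
-- outside the precondition, e.g. on getMostVisited(2, [0, -2, 2]): A returns 2, B returns 1
import Mathlib
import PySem

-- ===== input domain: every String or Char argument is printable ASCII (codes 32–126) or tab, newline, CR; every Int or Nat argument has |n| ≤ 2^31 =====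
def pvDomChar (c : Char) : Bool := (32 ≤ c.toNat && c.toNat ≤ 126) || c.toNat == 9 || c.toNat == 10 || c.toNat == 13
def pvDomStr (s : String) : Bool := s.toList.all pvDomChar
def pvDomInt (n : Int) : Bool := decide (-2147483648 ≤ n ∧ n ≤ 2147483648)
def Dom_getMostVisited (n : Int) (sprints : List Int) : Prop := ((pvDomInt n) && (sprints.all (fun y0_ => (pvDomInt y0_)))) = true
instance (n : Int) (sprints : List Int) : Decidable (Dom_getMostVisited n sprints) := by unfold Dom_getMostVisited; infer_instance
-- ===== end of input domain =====

-- B replaces A's difference-array + prefix-sum scan by direct per-position increments over each covered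
-- range (alternative decomposition, not faster); proved equal on the natural domain Pre_ below.


-- ===== PORT A =====
-- loop body of A's first for-loop: incre_mental[start] += 1; incre_mental[end+1] -= 1
def aDiffStep (sprints : List Int) (acc : List Int) (i : Int) : List Int :=
  let start := min (PySem.List.pyGetD sprints i 0) (PySem.List.pyGetD sprints (i + 1) 0)
  let e := max (PySem.List.pyGetD sprints i 0) (PySem.List.pyGetD sprints (i + 1) 0)
  let acc1 := PySem.List.pySetD acc start (PySem.List.pyGetD acc start 0 + 1)
  PySem.List.pySetD acc1 (e + 1) (PySem.List.pyGetD acc1 (e + 1) 0 - 1)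

-- loop body of A's second for-loop: score += incre_mental[i]; scores[i] = score
def aScoreStep (incre : List Int) (p : List Int × Int) (i : Int) : List Int × Int :=
  let score := p.2 + PySem.List.pyGetD incre i 0
  (PySem.List.pySetD p.1 i score, score)

def getMostVisited (n : Int) (sprints : List Int) : Int :=
  let incre := (PySem.List.pyRange 0 ((sprints.length : Int) - 1) 1).foldl
    (aDiffStep sprints) (List.replicate (n + 2).toNat 0)
  let p := (PySem.List.pyRange 1 (n + 1) 1).foldl (aScoreStep incre)
    (List.replicate (n + 1).toNat 0, 0)
  match PySem.List.max? p.1 (fun x => x) with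
  | some m =>
    match PySem.List.index? p.1 m with
    | some k => (k : Int)
    | none => 0
  | none => 0

-- ===== PORT B =====
-- inner loop body of B: scores[pos] += 1
def bInner (sc : List Int) (pos : Int) : List Int :=
  PySem.List.pySetD sc pos (PySem.List.pyGetD sc pos 0 + 1)

-- outer loop body of B: for pos in range(start, end+1): scores[pos] += 1
def bStep (sprints : List Int) (sc : List Int) (i : Int) : List Int :=
  let start := min (PySem.List.pyGetD sprints i 0) (PySem.List.pyGetD sprints (i + 1) 0)
  let e := max (PySem.List.pyGetD sprints i 0) (PySem.List.pyGetD sprints (i + 1) 0)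
  (PySem.List.pyRange start (e + 1) 1).foldl bInner sc

def getMostVisited_alt (n : Int) (sprints : List Int) : Int :=
  let scores := (PySem.List.pyRange 0 ((sprints.length : Int) - 1) 1).foldl
    (bStep sprints) (List.replicate (n + 1).toNat 0)
  match PySem.List.max? scores (fun x => x) with
  | some m =>
    match PySem.List.index? scores m with
    | some k => (k : Int)
    | none => 0
  | none => 0

-- ===== PRECONDITION & SPEC =====
-- Pre_ restricts to the task's natural domain: 0 ≤ n and (when there are at least two visits) every
-- sprint position in [1, n]; outside it A either raises IndexError or returns a value produced by
-- Python's negative-index wraparound, an artefact of the difference-array layout that B does not mimic.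
def Pre_getMostVisited (n : Int) (sprints : List Int) : Prop :=
  0 ≤ n ∧ (sprints.length ≤ 1 ∨ ∀ s ∈ sprints, 1 ≤ s ∧ s ≤ n)
instance (n : Int) (sprints : List Int) : Decidable (Pre_getMostVisited n sprints) := by
  unfold Pre_getMostVisited; infer_instance

def pvWitness_getMostVisited : Int × List Int := (4, [1, 3, 2])

def Spec_getMostVisited (n : Int) (sprints : List Int) (out : Int) : Prop := out = getMostVisited_alt n sprints
instance (n : Int) (sprints : List Int) (out : Int) : Decidable (Spec_getMostVisited n sprints out) := by unfold Spec_getMostVisited; infer_instance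

-- ===== CLAIM (what is proved, stated in full; the proofs are below) =====
def Claim_equal_getMostVisited : Prop := ∀ (n : Int) (sprints : List Int), Dom_getMostVisited n sprints → Pre_getMostVisited n sprints → Spec_getMostVisited n sprints (getMostVisited n sprints)

-- ===== LEMMAS AND PROOFS =====

-- abbreviations for the two endpoints of the i-th adjacent pair
def lo (sprints : List Int) (i : Int) : Int :=
  min (PySem.List.pyGetD sprints i 0) (PySem.List.pyGetD sprints (i + 1) 0)
def hi (sprints : List Int) (i : Int) : Int :=
  max (PySem.List.pyGetD sprints i 0) (PySem.List.pyGetD sprints (i + 1) 0)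

-- number of the first k pairs covering position j
def cnt (sprints : List Int) (k : Nat) (j : Int) : Int :=
  ((PySem.List.pyRange 0 k 1).map
    (fun i => if lo sprints i ≤ j ∧ j ≤ hi sprints i then (1 : Int) else 0)).sum

-- difference-array value contributed at position j by the first k pairs
def dsum (sprints : List Int) (k : Nat) (j : Int) : Int :=
  ((PySem.List.pyRange 0 k 1).map
    (fun i => (if lo sprints i = j then (1 : Int) else 0) - (if hi sprints i + 1 = j then 1 else 0))).sum

theorem pyGetD_pySetD_int (xs : List Int) (i j v d : Int) (hi0 : 0 ≤ i) (_hi1 : i < xs.length)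
    (hj0 : 0 ≤ j) (hj1 : j < xs.length) :
    PySem.List.pyGetD (PySem.List.pySetD xs i v) j d = if j = i then v else PySem.List.pyGetD xs j d := by
  rw [PySem.List.pySetD_of_nonneg xs v hi0]
  rw [PySem.List.pyGetD_eq_getElem _ d hj0 (by simpa using hj1)]
  rw [PySem.List.pyGetD_eq_getElem xs d hj0 hj1]
  rw [List.getElem_set]
  split_ifs <;> first | rfl | omega

theorem length_foldl_pySetD_sum (r : List Int) (sc : List Int) :
    (r.foldl bInner sc).length = sc.length := by
  induction r generalizing sc with
  | nil => rfl
  | cons x t ih => simp [List.foldl_cons, ih, bInner, PySem.List.length_pySetD]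

theorem inner_eff (b : Int) : ∀ (t : Nat) (a : Int), (b - a).toNat = t →
    ∀ (sc : List Int) (j : Int), 0 ≤ j → j < sc.length → 0 ≤ a → b ≤ sc.length →
    PySem.List.pyGetD ((PySem.List.pyRange a b 1).foldl bInner sc) j 0 =
      PySem.List.pyGetD sc j 0 + (if a ≤ j ∧ j < b then 1 else 0) := by
  intro t
  induction t with
  | zero =>
    intro a ht sc j hj0 hj1 ha hb
    rw [PySem.List.pyRange_one_eq_nil (by omega)]
    have : ¬ (a ≤ j ∧ j < b) := by omega
    simp [this]
  | succ t ih =>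
    intro a ht sc j hj0 hj1 ha hb
    have hab : a < b := by omega
    rw [PySem.List.pyRange_one_cons hab, List.foldl_cons]
    rw [ih (a + 1) (by omega) _ j hj0 (by simpa [bInner, PySem.List.length_pySetD] using hj1)
      (by omega) (by simpa [bInner, PySem.List.length_pySetD] using hb)]
    rw [show bInner sc a = PySem.List.pySetD sc a (PySem.List.pyGetD sc a 0 + 1) from rfl]
    rw [pyGetD_pySetD_int sc a j _ 0 ha (by omega) hj0 hj1]
    by_cases hja : j = a
    · subst hja
      split_ifs <;> omega
    · rw [if_neg hja]
      split_ifs <;> omega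

theorem sum_sub_ind (c d : Int) : ∀ (t : Nat) (a b : Int), (b - a).toNat = t →
    ((PySem.List.pyRange a b 1).map
      (fun x => (if c = x then (1 : Int) else 0) - (if d = x then 1 else 0))).sum =
    (if a ≤ c ∧ c < b then (1 : Int) else 0) - (if a ≤ d ∧ d < b then 1 else 0) := by
  intro t
  induction t with
  | zero =>
    intro a b ht
    rw [PySem.List.pyRange_one_eq_nil (by omega)]
    have h1 : ¬ (a ≤ c ∧ c < b) := by omega
    have h2 : ¬ (a ≤ d ∧ d < b) := by omega
    simp [h1, h2]
  | succ t ih =>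
    intro a b ht
    have hab : a < b := by omega
    rw [PySem.List.pyRange_one_cons hab, List.map_cons, List.sum_cons, ih (a + 1) b (by omega)]
    split_ifs <;> omega

-- sum over i' in [1, j+1) of the i-th pair's difference marks = its coverage indicator at j
theorem pair_prefix (sprints : List Int) (i j : Int) (h1 : 1 ≤ lo sprints i) :
    ((PySem.List.pyRange 1 (j + 1) 1).map
      (fun x => (if lo sprints i = x then (1 : Int) else 0) - (if hi sprints i + 1 = x then 1 else 0))).sum =
    (if lo sprints i ≤ j ∧ j ≤ hi sprints i then 1 else 0) := by
  rw [sum_sub_ind (lo sprints i) (hi sprints i + 1) (j + 1 - 1).toNat 1 (j + 1) rfl]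
  have hlh : lo sprints i ≤ hi sprints i := by
    unfold lo hi; exact min_le_max
  split_ifs <;> omega

theorem prefix_dsum (sprints : List Int) (n : Int) (k : Nat)
    (hb : ∀ i : Int, 0 ≤ i → i < k → 1 ≤ lo sprints i ∧ hi sprints i ≤ n) (j : Int) :
    ((PySem.List.pyRange 1 (j + 1) 1).map (fun x => dsum sprints k x)).sum = cnt sprints k j := by
  induction k with
  | zero =>
    simp [dsum, cnt]
  | succ k ih =>
    have hsplit : ∀ x : Int, dsum sprints (k + 1) x =
        dsum sprints k x + ((if lo sprints k = x then (1 : Int) else 0) - (if hi sprints k + 1 = x then 1 else 0)) := by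
      intro x
      unfold dsum
      rw [show ((k + 1 : Nat) : Int) = (k : Int) + 1 by push_cast; ring,
        PySem.List.pyRange_one_succ_right (by positivity), List.map_append, List.sum_append]
      simp
    have hcnt : cnt sprints (k + 1) j =
        cnt sprints k j + (if lo sprints k ≤ j ∧ j ≤ hi sprints k then 1 else 0) := by
      unfold cnt
      rw [show ((k + 1 : Nat) : Int) = (k : Int) + 1 by push_cast; ring,
        PySem.List.pyRange_one_succ_right (by positivity), List.map_append, List.sum_append]
      simp
    calc ((PySem.List.pyRange 1 (j + 1) 1).map (fun x => dsum sprints (k + 1) x)).sum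
        = ((PySem.List.pyRange 1 (j + 1) 1).map (fun x => dsum sprints k x)).sum
          + ((PySem.List.pyRange 1 (j + 1) 1).map
              (fun x => (if lo sprints k = x then (1 : Int) else 0) - (if hi sprints k + 1 = x then 1 else 0))).sum := by
          simp only [hsplit]
          rw [← PySem.List.sum_map_add_int]
      _ = cnt sprints (k + 1) j := by
          rw [ih (fun i h0 hk => hb i h0 (by omega)),
            pair_prefix sprints k j (hb k (by positivity) (by exact_mod_cast Nat.lt_succ_self k)).1, hcnt]

theorem length_foldl_aDiffStep (sprints : List Int) (r : List Int) (acc : List Int) :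
    (r.foldl (aDiffStep sprints) acc).length = acc.length := by
  induction r generalizing acc with
  | nil => rfl
  | cons x t ih => simp [List.foldl_cons, ih, aDiffStep, PySem.List.length_pySetD]

theorem diff_eff (sprints : List Int) (n : Int) (hn : 0 ≤ n) (k : Nat)
    (hb : ∀ i : Int, 0 ≤ i → i < k → 1 ≤ lo sprints i ∧ hi sprints i ≤ n) :
    ∀ (j : Int), 0 ≤ j → j < (n + 2).toNat →
    PySem.List.pyGetD ((PySem.List.pyRange 0 k 1).foldl (aDiffStep sprints)
        (List.replicate (n + 2).toNat 0)) j 0 = dsum sprints k j := by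
  induction k with
  | zero =>
    intro j hj0 hj1
    rw [PySem.List.pyGetD_eq_getElem _ 0 hj0 (by simpa using hj1)]
    simp [dsum, PySem.List.pyRange_one_eq_nil]
  | succ k ih =>
    intro j hj0 hj1
    have hlen : ((PySem.List.pyRange 0 k 1).foldl (aDiffStep sprints)
        (List.replicate (n + 2).toNat 0)).length = (n + 2).toNat := by
      rw [length_foldl_aDiffStep]; simp
    have hbk := hb k (by positivity) (by exact_mod_cast Nat.lt_succ_self k)
    have hlh : lo sprints (k : Int) ≤ hi sprints (k : Int) := by unfold lo hi; exact min_le_max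
    rw [show ((k + 1 : Nat) : Int) = (k : Int) + 1 by push_cast; ring,
      PySem.List.pyRange_one_succ_right (by positivity), List.foldl_append, List.foldl_cons,
      List.foldl_nil]
    set acc := (PySem.List.pyRange 0 k 1).foldl (aDiffStep sprints) (List.replicate (n + 2).toNat 0)
    have hl1 : (0 : Int) ≤ lo sprints k := by omega
    have hl2 : lo sprints (k : Int) < (acc.length : Int) := by rw [hlen]; omega
    have hset1 : (PySem.List.pySetD acc (lo sprints k)
        (PySem.List.pyGetD acc (lo sprints k) 0 + 1)).length = acc.length :=
      PySem.List.length_pySetD _ _ _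
    rw [show aDiffStep sprints acc k = PySem.List.pySetD
        (PySem.List.pySetD acc (lo sprints k) (PySem.List.pyGetD acc (lo sprints k) 0 + 1))
        (hi sprints k + 1)
        (PySem.List.pyGetD (PySem.List.pySetD acc (lo sprints k)
          (PySem.List.pyGetD acc (lo sprints k) 0 + 1)) (hi sprints k + 1) 0 - 1) from rfl]
    rw [pyGetD_pySetD_int _ _ j _ 0 (by omega) (by rw [hset1]; rw [hlen]; omega) hj0
      (by rw [hset1]; rw [hlen]; omega)]
    rw [pyGetD_pySetD_int _ _ (hi sprints k + 1) _ 0 hl1 hl2 (by omega)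
      (by rw [hlen]; omega)]
    rw [pyGetD_pySetD_int _ _ j _ 0 hl1 hl2 hj0 (by rw [hlen]; omega)]
    have hdk : dsum sprints (k + 1) j = dsum sprints k j +
        ((if lo sprints k = j then (1 : Int) else 0) - (if hi sprints k + 1 = j then 1 else 0)) := by
      unfold dsum
      rw [show ((k + 1 : Nat) : Int) = (k : Int) + 1 by push_cast; ring,
        PySem.List.pyRange_one_succ_right (by positivity), List.map_append, List.sum_append]
      simp
    rw [hdk, ← ih (fun i h0 hk => hb i h0 (by omega)) j hj0 hj1]
    by_cases hA : j = hi sprints (k : Int) + 1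
    · subst hA
      by_cases hB : hi sprints (k : Int) + 1 = lo sprints (k : Int)
      · rw [← hB]
        split_ifs <;> omega
      · split_ifs <;> omega
    · by_cases hB : j = lo sprints (k : Int)
      · subst hB
        split_ifs <;> omega
      · split_ifs <;> omega

theorem outer_B (sprints : List Int) (n : Int) (hn : 0 ≤ n) (k : Nat)
    (hb : ∀ i : Int, 0 ≤ i → i < k → 1 ≤ lo sprints i ∧ hi sprints i ≤ n) :
    ∀ (j : Int), 0 ≤ j → j < (n + 1).toNat →
    PySem.List.pyGetD ((PySem.List.pyRange 0 k 1).foldl (bStep sprints)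
        (List.replicate (n + 1).toNat 0)) j 0 = cnt sprints k j := by
  induction k with
  | zero =>
    intro j hj0 hj1
    rw [PySem.List.pyGetD_eq_getElem _ 0 hj0 (by simpa using hj1)]
    simp [cnt, PySem.List.pyRange_one_eq_nil]
  | succ k ih =>
    intro j hj0 hj1
    have hlenB : ∀ r acc, (List.foldl (bStep sprints) acc r).length = List.length acc := by
      intro r
      induction r with
      | nil => intro acc; rfl
      | cons x t iht =>
        intro acc
        simp [List.foldl_cons, iht, bStep, length_foldl_pySetD_sum]
    have hlen : ((PySem.List.pyRange 0 k 1).foldl (bStep sprints)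
        (List.replicate (n + 1).toNat 0)).length = (n + 1).toNat := by
      rw [hlenB]; simp
    have hbk := hb k (by positivity) (by exact_mod_cast Nat.lt_succ_self k)
    have hlh : lo sprints (k : Int) ≤ hi sprints (k : Int) := by unfold lo hi; exact min_le_max
    rw [show ((k + 1 : Nat) : Int) = (k : Int) + 1 by push_cast; ring,
      PySem.List.pyRange_one_succ_right (by positivity), List.foldl_append, List.foldl_cons,
      List.foldl_nil]
    set acc := (PySem.List.pyRange 0 k 1).foldl (bStep sprints) (List.replicate (n + 1).toNat 0)
    rw [show bStep sprints acc k =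
        (PySem.List.pyRange (lo sprints k) (hi sprints k + 1) 1).foldl bInner acc from rfl]
    rw [inner_eff (hi sprints k + 1) (hi sprints k + 1 - lo sprints k).toNat (lo sprints k) rfl acc j
      hj0 (by rw [hlen]; omega) (by omega) (by rw [hlen]; omega)]
    have hck : cnt sprints (k + 1) j = cnt sprints k j +
        (if lo sprints k ≤ j ∧ j ≤ hi sprints k then 1 else 0) := by
      unfold cnt
      rw [show ((k + 1 : Nat) : Int) = (k : Int) + 1 by push_cast; ring,
        PySem.List.pyRange_one_succ_right (by positivity), List.map_append, List.sum_append]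
      simp
    rw [hck, ih (fun i h0 hk => hb i h0 (by omega)) j hj0 hj1]
    split_ifs <;> omega

-- A's second loop: running prefix sums of incre written into scores
theorem scoresA_eff (incre : List Int) (n : Int) (hn : 0 ≤ n) :
    ∀ (t : Nat), (t : Int) ≤ n →
    (((PySem.List.pyRange 1 (1 + t) 1).foldl (aScoreStep incre)
        (List.replicate (n + 1).toNat 0, 0)).1.length = (n + 1).toNat ∧
     ((PySem.List.pyRange 1 (1 + t) 1).foldl (aScoreStep incre)
        (List.replicate (n + 1).toNat 0, 0)).2 =
       ((PySem.List.pyRange 1 (1 + t) 1).map (fun x => PySem.List.pyGetD incre x 0)).sum) ∧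
    ∀ (j : Int), 0 ≤ j → j < (n + 1).toNat →
    PySem.List.pyGetD ((PySem.List.pyRange 1 (1 + t) 1).foldl (aScoreStep incre)
        (List.replicate (n + 1).toNat 0, 0)).1 j 0 =
      if 1 ≤ j ∧ j < 1 + t then
        ((PySem.List.pyRange 1 (j + 1) 1).map (fun x => PySem.List.pyGetD incre x 0)).sum
      else 0 := by
  intro t
  induction t with
  | zero =>
    intro ht
    refine ⟨⟨by simp [PySem.List.pyRange_one_eq_nil], by simp [PySem.List.pyRange_one_eq_nil]⟩, ?_⟩
    intro j hj0 hj1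
    have : ¬ (1 ≤ j ∧ j < 1 + (0 : Nat)) := by omega
    simp only [this, if_false]
    rw [PySem.List.pyRange_one_eq_nil (by omega), List.foldl_nil]
    rw [PySem.List.pyGetD_eq_getElem _ 0 hj0 (by simpa using hj1)]
    simp
  | succ t ih =>
    intro ht
    have ht' : (t : Int) ≤ n := by push_cast at ht ⊢; omega
    obtain ⟨⟨ihlen, ihscore⟩, ihget⟩ := ih ht'
    have hsplit : PySem.List.pyRange 1 (1 + ((t : Int) + 1)) 1 =
        PySem.List.pyRange 1 (1 + t) 1 ++ [1 + (t : Int)] := by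
      rw [show (1 : Int) + ((t : Int) + 1) = (1 + (t : Int)) + 1 by ring]
      exact PySem.List.pyRange_one_succ_right (by omega)
    set p := (PySem.List.pyRange 1 (1 + (t : Int)) 1).foldl (aScoreStep incre)
      (List.replicate (n + 1).toNat 0, 0) with hp
    have hstep : (PySem.List.pyRange 1 (1 + ((t : Nat) + 1 : Nat)) 1).foldl (aScoreStep incre)
        (List.replicate (n + 1).toNat 0, 0) = aScoreStep incre p (1 + (t : Int)) := by
      rw [show ((((t : Nat) + 1 : Nat)) : Int) = (t : Int) + 1 by push_cast; ring, hsplit,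
        List.foldl_append, List.foldl_cons, List.foldl_nil]
    have hnew : ((PySem.List.pyRange 1 (1 + (t : Int) + 1) 1).map
        (fun x => PySem.List.pyGetD incre x 0)).sum =
        ((PySem.List.pyRange 1 (1 + (t : Int)) 1).map (fun x => PySem.List.pyGetD incre x 0)).sum
          + PySem.List.pyGetD incre (1 + (t : Int)) 0 := by
      rw [PySem.List.pyRange_one_succ_right (by omega), List.map_append, List.sum_append]
      simp
    constructor
    · constructor
      · rw [hstep]
        show (PySem.List.pySetD p.1 _ _).length = _
        rw [PySem.List.length_pySetD, ihlen]
      · rw [hstep]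
        show p.2 + PySem.List.pyGetD incre (1 + (t : Int)) 0 = _
        rw [ihscore, show ((1 : Int) + (((t : Nat) + 1 : Nat) : Int)) = 1 + (t : Int) + 1 by push_cast; ring, hnew]
    · intro j hj0 hj1
      rw [hstep]
      show PySem.List.pyGetD (PySem.List.pySetD p.1 (1 + (t : Int))
        (p.2 + PySem.List.pyGetD incre (1 + (t : Int)) 0)) j 0 = _
      rw [pyGetD_pySetD_int p.1 (1 + (t : Int)) j _ 0 (by positivity)
        (by rw [ihlen]; omega) hj0 (by rw [ihlen]; exact_mod_cast hj1)]
      rw [ihscore, ihget j hj0 hj1]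
      by_cases hje : j = 1 + (t : Int)
      · subst hje
        have hc : (1 : Int) ≤ 1 + (t : Int) ∧ 1 + (t : Int) < 1 + (((t : Nat) + 1 : Nat) : Int) := by
          push_cast; omega
        simp only [hc, if_pos, and_true]
        rw [show (1 : Int) + (t : Int) + 1 = (1 + (t : Int)) + 1 from rfl] at hnew
        rw [← hnew]
      · rw [if_neg hje]
        have hiff : (1 ≤ j ∧ j < 1 + (((t : Nat) + 1 : Nat) : Int)) ↔ (1 ≤ j ∧ j < 1 + (t : Int)) := by
          push_cast; omega
        rw [if_congr hiff rfl rfl]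

theorem pyRange_zero_toNat (m : Int) : PySem.List.pyRange 0 m 1 = PySem.List.pyRange 0 (m.toNat : Int) 1 := by
  by_cases h : 0 ≤ m
  · rw [Int.toNat_of_nonneg h]
  · rw [PySem.List.pyRange_one_eq_nil (by omega), PySem.List.pyRange_one_eq_nil (by omega)]

theorem cnt_zero (sprints : List Int) (n : Int) (k : Nat)
    (hb : ∀ i : Int, 0 ≤ i → i < k → 1 ≤ lo sprints i ∧ hi sprints i ≤ n) :
    cnt sprints k 0 = 0 := by
  unfold cnt
  rw [List.map_congr_left (g := fun _ => (0 : Int)), List.sum_eq_zero (by simp)]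
  intro i hmem
  rw [PySem.List.mem_pyRange_one] at hmem
  have := hb i hmem.1 hmem.2
  have hlh : lo sprints i ≤ hi sprints i := by unfold lo hi; exact min_le_max
  have : ¬ (lo sprints i ≤ 0 ∧ (0 : Int) ≤ hi sprints i) := by omega
  simp [this]

-- the two final scores lists are equal
theorem scores_eq (n : Int) (sprints : List Int) (hn : 0 ≤ n)
    (hb : ∀ i : Int, 0 ≤ i → i < ((sprints.length : Int) - 1).toNat →
      1 ≤ lo sprints i ∧ hi sprints i ≤ n) :
    ((PySem.List.pyRange 1 (n + 1) 1).foldl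
      (aScoreStep ((PySem.List.pyRange 0 ((sprints.length : Int) - 1) 1).foldl (aDiffStep sprints)
        (List.replicate (n + 2).toNat 0)))
      (List.replicate (n + 1).toNat 0, 0)).1 =
    (PySem.List.pyRange 0 ((sprints.length : Int) - 1) 1).foldl (bStep sprints)
      (List.replicate (n + 1).toNat 0) := by
  set K := ((sprints.length : Int) - 1).toNat with hK
  set incre := (PySem.List.pyRange 0 ((sprints.length : Int) - 1) 1).foldl (aDiffStep sprints)
    (List.replicate (n + 2).toNat 0) with hincre
  have hincre' : incre = (PySem.List.pyRange 0 (K : Int) 1).foldl (aDiffStep sprints)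
      (List.replicate (n + 2).toNat 0) := by
    rw [hincre, pyRange_zero_toNat]
  have hrange : PySem.List.pyRange 1 (n + 1) 1 = PySem.List.pyRange 1 (1 + (n.toNat : Int)) 1 := by
    rw [show (n : Int) + 1 = 1 + n by ring, Int.toNat_of_nonneg hn]
  have hA := scoresA_eff incre n hn n.toNat (by omega)
  obtain ⟨⟨hlenA, _⟩, hgetA⟩ := hA
  have hlenB : ∀ r acc, (List.foldl (bStep sprints) acc r).length = List.length acc := by
    intro r
    induction r with
    | nil => intro acc; rfl
    | cons x t iht =>
      intro acc
      simp [List.foldl_cons, iht, bStep, length_foldl_pySetD_sum]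
  have hBrange : (PySem.List.pyRange 0 ((sprints.length : Int) - 1) 1).foldl (bStep sprints)
      (List.replicate (n + 1).toNat 0) = (PySem.List.pyRange 0 (K : Int) 1).foldl (bStep sprints)
      (List.replicate (n + 1).toNat 0) := by rw [pyRange_zero_toNat]
  rw [hrange, hBrange]
  apply List.ext_getElem
  · rw [hlenB, hlenA]
    simp
  · intro j hj1 hj2
    rw [hlenA] at hj1
    have hjn : ((j : Int)) < ((n + 1).toNat : Int) := by exact_mod_cast hj1
    have e1 : PySem.List.pyGetD ((PySem.List.pyRange 1 (1 + (n.toNat : Int)) 1).foldl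
        (aScoreStep incre) (List.replicate (n + 1).toNat 0, 0)).1 (j : Int) 0 =
        ((PySem.List.pyRange 1 (1 + (n.toNat : Int)) 1).foldl (aScoreStep incre)
          (List.replicate (n + 1).toNat 0, 0)).1[j] := by
      rw [PySem.List.pyGetD_eq_getElem _ 0 (by positivity) (by rw [hlenA]; exact_mod_cast hj1)]
      simp
    have e2 : PySem.List.pyGetD ((PySem.List.pyRange 0 (K : Int) 1).foldl (bStep sprints)
        (List.replicate (n + 1).toNat 0)) (j : Int) 0 =
        ((PySem.List.pyRange 0 (K : Int) 1).foldl (bStep sprints)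
          (List.replicate (n + 1).toNat 0))[j] := by
      rw [PySem.List.pyGetD_eq_getElem _ 0 (by positivity) (by rw [hlenB, List.length_replicate]; exact_mod_cast hj1)]
      simp
    rw [← e1, ← e2]
    rw [hgetA (j : Int) (by positivity) hjn, outer_B sprints n hn K hb (j : Int) (by positivity) hjn]
    by_cases hj0 : (j : Int) = 0
    · rw [hj0]
      have : ¬ ((1 : Int) ≤ 0 ∧ (0 : Int) < 1 + (n.toNat : Int)) := by omega
      rw [if_neg this, cnt_zero sprints n K hb]
    · have hc : (1 : Int) ≤ (j : Int) ∧ (j : Int) < 1 + (n.toNat : Int) := by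
        constructor
        · omega
        · omega
      rw [if_pos hc]
      have hmap : (PySem.List.pyRange 1 ((j : Int) + 1) 1).map (fun x => PySem.List.pyGetD incre x 0) =
          (PySem.List.pyRange 1 ((j : Int) + 1) 1).map (fun x => dsum sprints K x) := by
        apply List.map_congr_left
        intro x hmem
        rw [PySem.List.mem_pyRange_one] at hmem
        rw [hincre']
        exact diff_eff sprints n hn K hb x (by omega) (by omega)
      rw [hmap, prefix_dsum sprints n K hb (j : Int)]

-- bounds on every adjacent pair, from Pre_
theorem pre_bounds (n : Int) (sprints : List Int) (hpre : Pre_getMostVisited n sprints) :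
    ∀ i : Int, 0 ≤ i → i < ((sprints.length : Int) - 1).toNat →
      1 ≤ lo sprints i ∧ hi sprints i ≤ n := by
  intro i h0 hk
  have hlen : i + 1 < (sprints.length : Int) := by omega
  obtain ⟨hn, hcase⟩ := hpre
  rcases hcase with hshort | hall
  · exfalso
    have : (sprints.length : Int) ≤ 1 := by exact_mod_cast hshort
    omega
  · have h1 : PySem.List.pyGetD sprints i 0 ∈ sprints := by
      apply PySem.List.pyGetD_mem
      unfold PySem.Raise.InRange
      omega
    have h2 : PySem.List.pyGetD sprints (i + 1) 0 ∈ sprints := by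
      apply PySem.List.pyGetD_mem
      unfold PySem.Raise.InRange
      omega
    have b1 := hall _ h1
    have b2 := hall _ h2
    constructor
    · unfold lo; omega
    · unfold hi; omega

-- ===== VERDICT (by name: the statement is the Claim_ definition above) =====
theorem getMostVisited_spec : Claim_equal_getMostVisited := by
  intro n sprints _ hpre
  unfold Spec_getMostVisited getMostVisited getMostVisited_alt
  have := scores_eq n sprints hpre.1 (pre_bounds n sprints hpre)
  simp only [this]
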